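-- pv_equiv track=rewrite | github.com/MateoGonzalezPautaso/fiuba-computer-engineering | TB024-teoria-de-algoritmos/TP2/tp2.py | maximizar_kills
-- ===== SOURCE A (Python) =====
-- def reconstruir_solucion(x, f, KILLS):
--     n = len(KILLS)
--     if n == 0: return []
--
--     decisiones = []
--
--     i = n - 1
--     anterior = i    # En la iteración "anterior" siempre se ataca
--
--     while i > 0:
--
--         if anterior == i:
--
--             for t in range(i - 1, -1, -1):
--                 if KILLS[i] == KILLS[t] + min(x[i - 1], f[(i - t) - 1]):
--                     decisiones.append("Atacar")
--                     anterior = t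
--                     break
--
--         else:
--             decisiones.append("Cargar")
--
--         i -= 1
--
--     decisiones.reverse()
--     return decisiones
--
-- def maximizar_kills(x, f):
--     n = len(x)
--     if n == 0: return 0
--
--     KILLS = [0] * (n + 1)
--
--     for i in range(1, n + 1):
--         max_kills = -1
--
--         for t in range(0, i):
--             ataque = KILLS[t] + min(x[i - 1], f[(i - t) - 1])
--
--             if ataque > max_kills:
--                 max_kills = ataque
--
--         KILLS[i] = max_kills
--
--     decisiones = reconstruir_solucion(x, f, KILLS)
--     return KILLS[n], decisiones
-- ===== SOURCE B (Python) =====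
-- def maximizar_kills(x, f):
--     n = len(x)
--     if n == 0: return 0
--
--     KILLS = [0] * (n + 1)
--     parent = [None] * (n + 1)
--
--     # Forward DP, recording for each i the largest t attaining the maximum
--     # (ascending scan with >=), so no second quadratic scan is needed later.
--     for i in range(1, n + 1):
--         best = -1
--         arg = None
--         for t in range(0, i):
--             ataque = KILLS[t] + min(x[i - 1], f[(i - t) - 1])
--             if ataque >= best:
--                 best = ataque
--                 arg = t
--         KILLS[i] = best
--         parent[i] = arg
--
--     # Reconstruct by walking parent pointers from node n.
--     decisiones = []
--     node = n
--     while node > 0: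
--         t = parent[node]
--         if t is None:
--             decisiones.extend(["Cargar"] * (node - 1))
--             node = 0
--         else:
--             decisiones.append("Atacar")
--             decisiones.extend(["Cargar"] * (node - t - 1))
--             node = t
--     decisiones.reverse()
--     return KILLS[n], decisiones
-- ===== Notes on version B (the rewrite author's own statement) =====
-- stated objective: alternative
-- what changed: B records a parent pointer (largest argmax, via >= on an ascending scan) during the forward DP and reconstructs the decision list by walking parent pointers from n, replacing A's separate reconstruction pass that re-scans all candidates downward at every attack node.
-- outside the precondition, e.g. on maximizar_kills([], []): A returns 0, B returns 0; on maximizar_kills([1], []): A raises IndexError, B raises IndexError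
import Mathlib
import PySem

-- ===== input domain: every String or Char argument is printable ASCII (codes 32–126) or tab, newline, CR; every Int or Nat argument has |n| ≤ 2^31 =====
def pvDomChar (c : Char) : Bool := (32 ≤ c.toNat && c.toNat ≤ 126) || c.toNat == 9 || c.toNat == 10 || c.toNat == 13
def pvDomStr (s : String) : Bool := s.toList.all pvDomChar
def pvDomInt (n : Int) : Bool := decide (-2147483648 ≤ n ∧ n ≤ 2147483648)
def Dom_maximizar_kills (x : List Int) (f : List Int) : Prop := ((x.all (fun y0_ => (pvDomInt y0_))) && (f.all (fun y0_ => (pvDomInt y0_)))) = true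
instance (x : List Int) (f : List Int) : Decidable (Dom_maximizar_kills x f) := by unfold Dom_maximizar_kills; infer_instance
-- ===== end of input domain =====

-- B replaces A's second quadratic reconstruction scan by parent pointers recorded
-- during the DP and a linear pointer walk (alternative decomposition, same results).

-- ===== PORT A =====
-- inner loop: for t in range(0, c): ataque = KILLS[t] + min(x[i-1], f[(i-t)-1]); running max with `>` from -1
-- (all list reads are in range on Pre_, where `.getD _ 0` is exact Python indexing)
def aInner (x f K : List Int) (i : Nat) : Nat → Int
  | 0 => -1
  | c+1 =>
      let m := aInner x f K i c
      let ataque := K.getD c 0 + min (x.getD (i-1) 0) (f.getD (i-c-1) 0)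
      if ataque > m then ataque else m

-- body of the outer for-loop: KILLS[i] = max_kills
def aStep (x f : List Int) (K : List Int) (i : Nat) : List Int := K.set i (aInner x f K i i)

-- for t in range(i-1, -1, -1): first t (scanning downward) with KILLS[i] == KILLS[t] + min(x[i-1], f[(i-t)-1])
def findAttack (x f K : List Int) (i : Nat) : Nat → Option Nat
  | 0 => none
  | c+1 =>
      if K.getD i 0 == K.getD c 0 + min (x.getD (i-1) 0) (f.getD (i-c-1) 0) then some c
      else findAttack x f K i c

-- while i > 0: … ; i -= 1   (state: anterior, decisiones)
def aRecLoop (x f K : List Int) : Nat → Nat → List String → List String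
  | 0, _, dec => dec
  | j+1, anterior, dec =>
      if anterior == j+1 then
        match findAttack x f K (j+1) (j+1) with
        | some t => aRecLoop x f K j t (dec ++ ["Atacar"])
        | none => aRecLoop x f K j anterior dec
      else aRecLoop x f K j anterior (dec ++ ["Cargar"])

def reconstruir_solucion (x f KILLS : List Int) : List String :=
  let n := KILLS.length
  if n == 0 then []
  else (aRecLoop x f KILLS (n-1) (n-1) []).reverse

def maximizar_kills (x : List Int) (f : List Int) : Int × List String :=
  let n := x.length
  if n == 0 then (0, [])  -- Python A returns the bare int 0 here (not a tuple); x = [] is excluded by Pre_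
  else
    let K := (List.range' 1 n).foldl (aStep x f) (List.replicate (n+1) 0)
    (K.getD n 0, reconstruir_solucion x f K)

-- ===== PORT B =====
-- inner loop: same candidates, but `>=` from -1 and the (largest) argmax index is kept
def bInner (x f K : List Int) (i : Nat) : Nat → Int × Option Nat
  | 0 => (-1, none)
  | c+1 =>
      let p := bInner x f K i c
      let ataque := K.getD c 0 + min (x.getD (i-1) 0) (f.getD (i-c-1) 0)
      if ataque ≥ p.1 then (ataque, some c) else p

-- body of B's outer for-loop: KILLS[i] = best; parent[i] = arg
def bStep (x f : List Int) (s : List Int × List (Option Nat)) (i : Nat) : List Int × List (Option Nat) :=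
  ((s.1.set i (bInner x f s.1 i i).1), (s.2.set i (bInner x f s.1 i i).2))

-- while node > 0: walk parent pointers (the fuel only makes the loop total; n+1 steps always suffice)
def bWalk (P : List (Option Nat)) : Nat → Nat → List String → List String
  | 0, _, dec => dec
  | fuel+1, node, dec =>
      if node == 0 then dec
      else match P.getD node none with
           | none => dec ++ List.replicate (node-1) "Cargar"
           | some t => bWalk P fuel t (dec ++ "Atacar" :: List.replicate (node-t-1) "Cargar")

def maximizar_kills_alt (x : List Int) (f : List Int) : Int × List String :=
  let n := x.length
  if n == 0 then (0, [])  -- same bare-int corner in Source B; excluded by Pre_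
  else
    let KP := (List.range' 1 n).foldl (bStep x f) (List.replicate (n+1) 0, List.replicate (n+1) (none : Option Nat))
    (KP.1.getD n 0, (bWalk KP.2 (n+1) n []).reverse)

-- ===== PRECONDITION & SPEC =====
-- Pre_ excludes x = [] (both programs return the bare int 0 there, not a (kills, decisions)
-- tuple of the declared return type) and inputs with len(f) < len(x), on which A raises IndexError.
def Pre_maximizar_kills (x : List Int) (f : List Int) : Prop := x ≠ [] ∧ x.length ≤ f.length
instance (x : List Int) (f : List Int) : Decidable (Pre_maximizar_kills x f) := by unfold Pre_maximizar_kills; infer_instance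
def pvWitness_maximizar_kills : List Int × List Int := ([3, 1, 2], [1, 2, 3, 4])

def Spec_maximizar_kills (x : List Int) (f : List Int) (out : Int × List String) : Prop := out = maximizar_kills_alt x f
instance (x : List Int) (f : List Int) (out : Int × List String) : Decidable (Spec_maximizar_kills x f out) := by unfold Spec_maximizar_kills; infer_instance

-- ===== CLAIM (what is proved, stated in full; the proofs are below) =====
def Claim_equal_maximizar_kills : Prop := ∀ (x : List Int) (f : List Int), Dom_maximizar_kills x f → Pre_maximizar_kills x f → Spec_maximizar_kills x f (maximizar_kills x f)

-- ===== LEMMAS AND PROOFS =====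

-- the candidate value scanned at index t, for a fixed KILLS list K and step i
def pvV (x f K : List Int) (i t : Nat) : Int := K.getD t 0 + min (x.getD (i-1) 0) (f.getD (i-t-1) 0)

-- A's KILLS list after processing steps 1..i
def pvKat (x f : List Int) (i : Nat) : List Int :=
  (List.range' 1 i).foldl (aStep x f) (List.replicate (x.length+1) 0)

-- B's (KILLS, parent) state after processing steps 1..i
def pvSat (x f : List Int) (i : Nat) : List Int × List (Option Nat) :=
  (List.range' 1 i).foldl (bStep x f) (List.replicate (x.length+1) 0, List.replicate (x.length+1) (none : Option Nat))

theorem bInner_fst (x f K : List Int) (i : Nat) : ∀ c, (bInner x f K i c).1 = aInner x f K i c := by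
  intro c
  induction c with
  | zero => rfl
  | succ c ih =>
    simp only [bInner, aInner]
    split_ifs with h1 h2 h2 <;> simp_all <;> omega

theorem bInner_none (x f K : List Int) (i : Nat) : ∀ c, (bInner x f K i c).2 = none →
    (bInner x f K i c).1 = -1 ∧ ∀ t, t < c → pvV x f K i t < -1 := by
  intro c
  induction c with
  | zero => intro _; exact ⟨rfl, fun t ht => absurd ht (Nat.not_lt_zero t)⟩
  | succ c ih =>
    simp only [bInner]
    split_ifs with h
    · intro hc; simp at hc
    · intro hc
      obtain ⟨h1, h2⟩ := ih hc
      refine ⟨h1, fun t ht => ?_⟩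
      rcases Nat.lt_succ_iff_lt_or_eq.mp ht with h' | rfl
      · exact h2 t h'
      · simp only [pvV]; rw [h1] at h; omega

theorem bInner_some (x f K : List Int) (i : Nat) : ∀ c t0, (bInner x f K i c).2 = some t0 →
    t0 < c ∧ pvV x f K i t0 = (bInner x f K i c).1 ∧
      ∀ s, t0 < s → s < c → pvV x f K i s < (bInner x f K i c).1 := by
  intro c
  induction c with
  | zero => intro t0 h; simp [bInner] at h
  | succ c ih =>
    intro t0
    simp only [bInner]
    split_ifs with h
    · intro hc
      simp only [Option.some.injEq] at hc
      subst hc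
      exact ⟨Nat.lt_succ_self _, rfl, fun s hs hs' => absurd hs' (by omega)⟩
    · intro hc
      obtain ⟨h1, h2, h3⟩ := ih t0 hc
      refine ⟨Nat.lt_succ_of_lt h1, h2, fun s hs hs' => ?_⟩
      rcases Nat.lt_succ_iff_lt_or_eq.mp hs' with h' | rfl
      · exact h3 s hs h'
      · simp only [pvV]; omega

theorem findAttack_none (x f K : List Int) (i : Nat) :
    ∀ c, (∀ t, t < c → pvV x f K i t ≠ K.getD i 0) → findAttack x f K i c = none := by
  intro c
  induction c with
  | zero => intro _; rfl
  | succ c ih =>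
    intro h
    simp only [findAttack]
    rw [if_neg, ih (fun t ht => h t (Nat.lt_succ_of_lt ht))]
    have := h c (Nat.lt_succ_self c)
    simp only [pvV] at this
    simpa [beq_iff_eq] using fun hh => this hh.symm

theorem findAttack_some (x f K : List Int) (i : Nat) :
    ∀ c t0, t0 < c → pvV x f K i t0 = K.getD i 0 →
      (∀ s, t0 < s → s < c → pvV x f K i s ≠ K.getD i 0) → findAttack x f K i c = some t0 := by
  intro c
  induction c with
  | zero => intro t0 h; omega
  | succ c ih =>
    intro t0 h1 h2 h3
    simp only [findAttack]
    rcases Nat.lt_succ_iff_lt_or_eq.mp h1 with h' | rfl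
    · rw [if_neg, ih t0 h' h2 (fun s hs hs' => h3 s hs (Nat.lt_succ_of_lt hs'))]
      have := h3 c h' (Nat.lt_succ_self c)
      simp only [pvV] at this
      simpa [beq_iff_eq] using fun hh => this hh.symm
    · rw [if_pos]
      simp only [pvV] at h2
      simpa [beq_iff_eq] using h2.symm

theorem foldA_len (x f : List Int) : ∀ (l : List Nat) (K : List Int),
    (l.foldl (aStep x f) K).length = K.length := by
  intro l
  induction l with
  | nil => intro K; rfl
  | cons a l ih => intro K; simp [List.foldl_cons, ih, aStep]

theorem foldB_len2 (x f : List Int) : ∀ (l : List Nat) (s : List Int × List (Option Nat)),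
    ((l.foldl (bStep x f) s).2).length = s.2.length := by
  intro l
  induction l with
  | nil => intro s; rfl
  | cons a l ih => intro s; simp [List.foldl_cons, ih, bStep]

theorem foldA_stable (x f : List Int) : ∀ (l : List Nat) (K : List Int) (t : Nat) (d : Int),
    (∀ i ∈ l, t < i) → (l.foldl (aStep x f) K).getD t d = K.getD t d := by
  intro l
  induction l with
  | nil => intro K t d _; rfl
  | cons a l ih =>
    intro K t d h
    simp only [List.foldl_cons]
    rw [ih _ _ _ (fun i hi => h i (List.mem_cons_of_mem a hi))]
    have ha : a ≠ t := by have := h a List.mem_cons_self; omega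
    simp [aStep, List.getD_eq_getElem?_getD, List.getElem?_set_ne ha]

theorem foldB_stable2 (x f : List Int) : ∀ (l : List Nat) (s : List Int × List (Option Nat)) (t : Nat),
    (∀ i ∈ l, t < i) → ((l.foldl (bStep x f) s).2).getD t none = s.2.getD t none := by
  intro l
  induction l with
  | nil => intro s t _; rfl
  | cons a l ih =>
    intro s t h
    simp only [List.foldl_cons]
    rw [ih _ _ (fun i hi => h i (List.mem_cons_of_mem a hi))]
    have ha : a ≠ t := by have := h a List.mem_cons_self; omega
    simp [bStep, List.getD_eq_getElem?_getD, List.getElem?_set_ne ha]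

theorem foldB_fst (x f : List Int) : ∀ (l : List Nat) (K : List Int) (P : List (Option Nat)),
    (l.foldl (bStep x f) (K, P)).1 = l.foldl (aStep x f) K := by
  intro l
  induction l with
  | nil => intro K P; rfl
  | cons a l ih =>
    intro K P
    simp only [List.foldl_cons, bStep, aStep, bInner_fst]
    exact ih _ _

theorem range'_split (i n : Nat) (h : i ≤ n) :
    List.range' 1 n = List.range' 1 i ++ List.range' (1+i) (n-i) := by
  rw [List.range'_append_1]
  congr 1
  omega

theorem pvKat_succ (x f : List Int) (i : Nat) (h : 1 ≤ i) :
    pvKat x f i = (pvKat x f (i-1)).set i (aInner x f (pvKat x f (i-1)) i i) := by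
  unfold pvKat
  have : List.range' 1 i = List.range' 1 (i-1) ++ [i] := by
    have h0 : List.range' 1 (i-1) ++ List.range' (1+(i-1)) 1 = List.range' 1 ((i-1)+1) := List.range'_append_1
    simp only [List.range'_one] at h0
    rw [show (1 + (i-1)) = i by omega, show (i - 1 + 1) = i by omega] at h0
    exact h0.symm
  rw [this, List.foldl_append]
  rfl

theorem pvSat_succ (x f : List Int) (i : Nat) (h : 1 ≤ i) :
    pvSat x f i = bStep x f (pvSat x f (i-1)) i := by
  unfold pvSat
  have : List.range' 1 i = List.range' 1 (i-1) ++ [i] := by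
    have h0 : List.range' 1 (i-1) ++ List.range' (1+(i-1)) 1 = List.range' 1 ((i-1)+1) := List.range'_append_1
    simp only [List.range'_one] at h0
    rw [show (1 + (i-1)) = i by omega, show (i - 1 + 1) = i by omega] at h0
    exact h0.symm
  rw [this, List.foldl_append]
  rfl

theorem pvKat_len (x f : List Int) (i : Nat) : (pvKat x f i).length = x.length + 1 := by
  unfold pvKat; rw [foldA_len]; simp

-- the final A-list agrees with the moment-of-writing value at position i
theorem Kfin_at (x f : List Int) (i : Nat) (h1 : 1 ≤ i) (h2 : i ≤ x.length) :
    (pvKat x f x.length).getD i 0 = aInner x f (pvKat x f (i-1)) i i := by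
  unfold pvKat
  rw [range'_split i x.length h2, List.foldl_append]
  rw [foldA_stable x f _ _ i 0 (fun j hj => by
    have := (List.mem_range'_1).mp hj; omega)]
  have := pvKat_succ x f i h1
  unfold pvKat at this
  rw [this]
  have hlen : i < ((List.range' 1 (i-1)).foldl (aStep x f) (List.replicate (x.length+1) 0)).length := by
    rw [foldA_len]; simp; omega
  simp [List.getD_eq_getElem?_getD, hlen]

-- positions below i never change after step i-1
theorem Kfin_lt (x f : List Int) (i t : Nat) (h1 : t < i) (h2 : i ≤ x.length) :
    (pvKat x f x.length).getD t 0 = (pvKat x f (i-1)).getD t 0 := by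
  unfold pvKat
  rw [range'_split (i-1) x.length (by omega), List.foldl_append]
  rw [foldA_stable x f _ _ t 0 (fun j hj => by
    have := (List.mem_range'_1).mp hj; omega)]

theorem Pfin_at (x f : List Int) (i : Nat) (h1 : 1 ≤ i) (h2 : i ≤ x.length) :
    ((pvSat x f x.length).2).getD i none = (bInner x f (pvKat x f (i-1)) i i).2 := by
  unfold pvSat
  rw [range'_split i x.length h2, List.foldl_append]
  rw [foldB_stable2 x f _ _ i (fun j hj => by
    have := (List.mem_range'_1).mp hj; omega)]
  have hstep := pvSat_succ x f i h1
  unfold pvSat at hstep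
  rw [hstep]
  have hfst : (pvSat x f (i-1)).1 = pvKat x f (i-1) := by
    unfold pvSat pvKat; exact foldB_fst x f _ _ _
  have hlen : i < ((pvSat x f (i-1)).2).length := by
    unfold pvSat; rw [foldB_len2]; simp; omega
  unfold pvSat at hfst hlen
  simp only [bStep]
  rw [hfst]
  simp [List.getD_eq_getElem?_getD, hlen]

theorem pvV_final (x f : List Int) (i t : Nat) (h1 : t < i) (h2 : i ≤ x.length) :
    pvV x f (pvKat x f x.length) i t = pvV x f (pvKat x f (i-1)) i t := by
  unfold pvV
  rw [Kfin_lt x f i t h1 h2]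

-- the downward re-scan of A's reconstruction finds exactly B's recorded parent
theorem findAttack_eq_parent (x f : List Int) (i : Nat) (h1 : 1 ≤ i) (h2 : i ≤ x.length) :
    findAttack x f (pvKat x f x.length) i i = ((pvSat x f x.length).2).getD i none := by
  have hb : (pvKat x f x.length).getD i 0 = (bInner x f (pvKat x f (i-1)) i i).1 := by
    rw [Kfin_at x f i h1 h2, bInner_fst]
  rw [Pfin_at x f i h1 h2]
  cases hp : (bInner x f (pvKat x f (i-1)) i i).2 with
  | none =>
    obtain ⟨hone, hall⟩ := bInner_none x f (pvKat x f (i-1)) i i hp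
    apply findAttack_none
    intro t ht
    rw [pvV_final x f i t ht h2, hb, hone]
    have := hall t ht
    omega
  | some t0 =>
    obtain ⟨ht0, heq, habove⟩ := bInner_some x f (pvKat x f (i-1)) i i t0 hp
    apply findAttack_some x f _ i i t0 ht0
    · rw [pvV_final x f i t0 ht0 h2, hb, heq]
    · intro s hs hs'
      rw [pvV_final x f i s hs' h2, hb]
      have := habove s hs hs'
      omega

theorem parent_lt (x f : List Int) (i t : Nat) (h1 : 1 ≤ i) (h2 : i ≤ x.length)
    (h : ((pvSat x f x.length).2).getD i none = some t) : t < i := by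
  rw [Pfin_at x f i h1 h2] at h
  exact (bInner_some x f _ i i t h).1

-- once `anterior` is ahead of i, only "Cargar" is appended until i = anterior
theorem aRecLoop_charge (x f K : List Int) : ∀ (k ant : Nat) (dec : List String), ant ≤ k →
    aRecLoop x f K k ant dec = aRecLoop x f K ant ant (dec ++ List.replicate (k-ant) "Cargar") := by
  intro k
  induction k with
  | zero =>
    intro ant dec h
    have h0 : ant = 0 := by omega
    subst h0
    simp [aRecLoop]
  | succ j ih =>
    intro ant dec h
    rcases Nat.lt_succ_iff_lt_or_eq.mp (Nat.lt_succ_of_le h) with h' | rfl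
    · have hne : (ant == j+1) = false := by
        simp only [beq_eq_false_iff_ne, ne_eq]
        omega
      simp only [aRecLoop, hne, Bool.false_eq_true, if_false]
      rw [ih ant _ (by omega)]
      rw [List.append_assoc, show j + 1 - ant = (j - ant) + 1 by omega, List.replicate_succ]
      rfl
    · simp

-- if `anterior` exceeds every remaining i, the rest of the loop appends only "Cargar"
theorem aRecLoop_runaway (x f K : List Int) : ∀ (j ant : Nat) (dec : List String), j < ant →
    aRecLoop x f K j ant dec = dec ++ List.replicate j "Cargar" := by
  intro j
  induction j with
  | zero => intro ant dec h; simp [aRecLoop]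
  | succ j ih =>
    intro ant dec h
    have hne : (ant == j+1) = false := by
      simp only [beq_eq_false_iff_ne, ne_eq]
      omega
    simp only [aRecLoop, hne, Bool.false_eq_true, if_false]
    rw [ih ant _ (by omega)]
    rw [List.append_assoc, List.replicate_succ]
    rfl

-- A's reconstruction loop equals B's pointer walk
theorem walk_eq (x f : List Int) : ∀ (fuel node : Nat) (dec : List String),
    node ≤ x.length → node ≤ fuel →
    aRecLoop x f (pvKat x f x.length) node node dec = bWalk (pvSat x f x.length).2 fuel node dec := by
  intro fuel
  induction fuel with
  | zero =>
    intro node dec h1 h2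
    have : node = 0 := by omega
    subst this
    rfl
  | succ fuel ih =>
    intro node dec h1 h2
    match node with
    | 0 => simp [aRecLoop, bWalk]
    | j+1 =>
      have hnz : ((j+1 : Nat) == 0) = false := by simp
      simp only [aRecLoop, bWalk, beq_self_eq_true, if_true, hnz, Bool.false_eq_true, if_false]
      rw [findAttack_eq_parent x f (j+1) (by omega) h1]
      cases hp : ((pvSat x f x.length).2).getD (j+1) none with
      | none =>
        simp only []
        rw [aRecLoop_runaway x f _ j (j+1) dec (Nat.lt_succ_self j)]
        simp
      | some t =>
        simp only []
        have ht : t < j + 1 := parent_lt x f (j+1) t (by omega) h1 hp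
        rw [aRecLoop_charge x f _ j t (dec ++ ["Atacar"]) (by omega)]
        rw [ih t _ (by omega) (by omega)]
        congr 1
        rw [List.append_assoc]
        congr 1
        rw [show j + 1 - t - 1 = j - t by omega]
        rfl

-- ===== VERDICT (by name: the statement is the Claim_ definition above) =====
theorem maximizar_kills_spec : Claim_equal_maximizar_kills := by
  intro x f _ hpre
  obtain ⟨hne, _⟩ := hpre
  unfold Spec_maximizar_kills
  have hn : x.length ≠ 0 := by simpa [List.length_eq_zero_iff] using hne
  have hnz : (x.length == 0) = false := by simpa using hn
  unfold maximizar_kills maximizar_kills_alt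
  simp only [hnz, Bool.false_eq_true, if_false]
  have hK : (List.range' 1 x.length).foldl (aStep x f) (List.replicate (x.length+1) 0) = pvKat x f x.length := rfl
  have hS : (List.range' 1 x.length).foldl (bStep x f) (List.replicate (x.length+1) 0, List.replicate (x.length+1) (none : Option Nat)) = pvSat x f x.length := rfl
  rw [hK, hS]
  have hfst : (pvSat x f x.length).1 = pvKat x f x.length := by
    unfold pvSat pvKat; cases hs : pvSat x f x.length; exact foldB_fst x f _ _ _
  rw [hfst]
  unfold reconstruir_solucion
  have hlen : (pvKat x f x.length).length = x.length + 1 := pvKat_len x f x.length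
  rw [hlen]
  have : ((x.length + 1 : Nat) == 0) = false := by simp
  simp only [this, Bool.false_eq_true, if_false, Nat.add_sub_cancel]
  rw [walk_eq x f (x.length + 1) x.length [] (le_refl _) (by omega)]
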